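-- pv_equiv track=rewrite | github.com/Chochanguk/CoTe_Practice | 프로그래머스/2/42584. 주식가격/주식가격.py | solution
-- ===== SOURCE A (Python) =====
-- def solution(prices):
--     n = len(prices)
--     answer = [0] * n
--     stack = []
--
--     for i in range(n):
--         # 가격이 떨어진 경우 계산
--         while stack and prices[stack[-1]] > prices[i]:
--             prev = stack.pop()
--             answer[prev] = i - prev
--         stack.append(i)
--
--     # 끝까지 떨어지지 않은 것 처리
--     while stack:
--         prev = stack.pop()
--         answer[prev] = n - 1 - prev
--
--     return answer
-- ===== SOURCE B (Python) =====
-- def solution(prices):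
--     answer = []
--     for i, p in enumerate(prices):
--         cnt = 0
--         for q in prices[i+1:]:
--             cnt += 1
--             if q < p:
--                 break
--         answer.append(cnt)
--     return answer
-- ===== Notes on version B (the rewrite author's own statement) =====
-- stated objective: simpler
-- what changed: Replaced the index stack with a direct per-element forward scan: for each price, count steps until the first strictly lower later price (no stack, no deferred answer filling).
import Mathlib
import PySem

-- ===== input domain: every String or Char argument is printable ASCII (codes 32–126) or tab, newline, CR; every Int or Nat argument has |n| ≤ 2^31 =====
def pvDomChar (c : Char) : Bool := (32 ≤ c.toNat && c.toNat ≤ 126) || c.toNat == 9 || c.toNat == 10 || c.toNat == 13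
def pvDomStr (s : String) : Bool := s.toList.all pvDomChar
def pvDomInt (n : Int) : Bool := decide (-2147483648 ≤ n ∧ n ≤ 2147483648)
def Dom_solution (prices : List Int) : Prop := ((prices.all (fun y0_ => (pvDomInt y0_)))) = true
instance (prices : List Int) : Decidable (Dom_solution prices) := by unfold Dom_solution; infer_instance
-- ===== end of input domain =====

-- B replaces A's stack-based lazy filling by a per-element forward scan (simpler, but O(n²)).

-- ===== PORT A =====
-- inner `while stack and prices[stack[-1]] > prices[i]` loop (stack head = Python stack top)
def pvPopLoop (prices : List Int) (i : Nat) : List Int → List Nat → List Int × List Nat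
  | answer, [] => (answer, [])
  | answer, prev :: rest =>
    if prices.getD prev 0 > prices.getD i 0 then
      pvPopLoop prices i (answer.set prev ((i : Int) - (prev : Int))) rest
    else (answer, prev :: rest)

-- one iteration of `for i in range(n)`
def pvStep (prices : List Int) (st : List Int × List Nat) (i : Nat) : List Int × List Nat :=
  let st' := pvPopLoop prices i st.1 st.2
  (st'.1, i :: st'.2)

-- trailing `while stack` loop
def pvFinalLoop (n : Nat) : List Int → List Nat → List Int
  | answer, [] => answer
  | answer, prev :: rest => pvFinalLoop n (answer.set prev ((n : Int) - 1 - (prev : Int))) rest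

def solution (prices : List Int) : List Int :=
  let n := prices.length
  let st := (List.range n).foldl (pvStep prices) (List.replicate n (0 : Int), ([] : List Nat))
  pvFinalLoop n st.1 st.2

-- ===== PORT B =====
-- inner `for q in prices[i+1:]` loop of Source B
def pvCountUntil (p : Int) : List Int → Int
  | [] => 0
  | q :: rest => if q < p then 1 else 1 + pvCountUntil p rest

-- outer loop of Source B, walking the suffixes
def pvGo : List Int → List Int
  | [] => []
  | p :: rest => pvCountUntil p rest :: pvGo rest

def solution_alt (prices : List Int) : List Int := pvGo prices

-- ===== PRECONDITION & SPEC =====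
def Spec_solution (prices : List Int) (out : List Int) : Prop := out = solution_alt prices
instance (prices : List Int) (out : List Int) : Decidable (Spec_solution prices out) := by unfold Spec_solution; infer_instance

-- ===== CLAIM (what is proved, stated in full; the proofs are below) =====
def Claim_equal_solution : Prop := ∀ (prices : List Int), Dom_solution prices → Spec_solution prices (solution prices)

-- ===== LEMMAS AND PROOFS =====

-- invariant of A's main loop after processing indices 0..k-1
def pvInv (prices : List Int) (k : Nat) (a : List Int) (s : List Nat) : Prop :=
  a.length = prices.length ∧
  (∀ j ∈ s, j < k) ∧
  List.Pairwise (fun x y => y < x ∧ prices.getD y 0 ≤ prices.getD x 0) s ∧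
  (∀ j, j < k → (j ∈ s ↔ ∀ m, j < m → m < k → ¬ (prices.getD m 0 < prices.getD j 0))) ∧
  (∀ j, j < k → j ∉ s → a.getD j 0 = pvCountUntil (prices.getD j 0) (prices.drop (j+1)))

lemma pvCountUntil_full (p : Int) (l : List Int)
    (h : ∀ m, m < l.length → ¬ l.getD m 0 < p) :
    pvCountUntil p l = (l.length : Int) := by
  induction l with
  | nil => simp [pvCountUntil]
  | cons q rest ih =>
    have hq : ¬ q < p := by simpa using h 0 (by simp)
    have : pvCountUntil p rest = (rest.length : Int) := by
      refine ih (fun m hm => ?_)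
      simpa using h (m+1) (by simpa using hm)
    simp [pvCountUntil, hq, this]
    omega

lemma pvCountUntil_first (p : Int) : ∀ (l : List Int) (t : Nat),
    t < l.length → (∀ m, m < t → ¬ l.getD m 0 < p) → l.getD t 0 < p →
    pvCountUntil p l = (t : Int) + 1 := by
  intro l
  induction l with
  | nil => intro t ht; simp at ht
  | cons q rest ih =>
    intro t ht hbefore hdrop
    cases t with
    | zero =>
      simp at hdrop
      simp [pvCountUntil, hdrop]
    | succ t' =>
      have hq : ¬ q < p := by simpa using hbefore 0 (Nat.succ_pos _)
      have := ih t' (by simpa using ht)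
        (fun m hm => by simpa using hbefore (m+1) (by omega))
        (by simpa using hdrop)
      simp [pvCountUntil, hq, this]
      omega

lemma pvDrop_getD (prices : List Int) (j m : Nat) :
    (prices.drop j).getD m 0 = prices.getD (j + m) 0 := by
  simp [List.getD_eq_getElem?_getD, List.getElem?_drop]

-- getD/set facts
lemma pvGetD_set_ne (a : List Int) (i j : Nat) (v : Int) (h : i ≠ j) :
    (a.set i v).getD j 0 = a.getD j 0 := by
  simp [List.getD_eq_getElem?_getD, List.getElem?_set_ne h]

lemma pvGetD_set_self (a : List Int) (i : Nat) (v : Int) (h : i < a.length) :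
    (a.set i v).getD i 0 = v := by
  simp [List.getD_eq_getElem?_getD, h]

-- characterisation of the inner pop loop: it pops a prefix, all strictly above prices[k]
lemma pvPopLoop_spec (prices : List Int) (k : Nat) : ∀ (s : List Nat) (a : List Int),
    ∃ popped s',
      s = popped ++ s' ∧
      pvPopLoop prices k a s =
        (popped.foldl (fun a p => a.set p ((k : Int) - (p : Int))) a, s') ∧
      (∀ x ∈ popped, prices.getD x 0 > prices.getD k 0) ∧
      (∀ h ∈ s'.head?, ¬ prices.getD h 0 > prices.getD k 0) := by
  intro s
  induction s with
  | nil => intro a; exact ⟨[], [], by simp [pvPopLoop]⟩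
  | cons prev rest ih =>
    intro a
    by_cases hgt : prices.getD prev 0 > prices.getD k 0
    · obtain ⟨popped, s', hsplit, heq, hall, hhead⟩ :=
        ih (a.set prev ((k : Int) - (prev : Int)))
      refine ⟨prev :: popped, s', by simp [hsplit], ?_, ?_, hhead⟩
      · show pvPopLoop prices k a (prev :: rest) = _
        simp only [pvPopLoop]
        rw [if_pos hgt, heq]
        rfl
      · intro x hx
        rcases List.mem_cons.mp hx with hx | hx
        · exact hx ▸ hgt
        · exact hall x hx
    · refine ⟨[], prev :: rest, rfl, ?_, by simp, by simpa using hgt⟩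
      show pvPopLoop prices k a (prev :: rest) = _
      simp only [pvPopLoop]
      rw [if_neg hgt]
      rfl

lemma pvSetAll_length (k : Nat) : ∀ (popped : List Nat) (a : List Int),
    (popped.foldl (fun a p => a.set p ((k : Int) - (p : Int))) a).length = a.length := by
  intro popped
  induction popped with
  | nil => intro a; rfl
  | cons p ps ih => intro a; simp [List.foldl_cons, ih, List.length_set]

lemma pvSetAll_getD (k : Nat) : ∀ (popped : List Nat) (a : List Int), popped.Nodup →
    (∀ x ∈ popped, x < a.length) → ∀ j,
    (popped.foldl (fun a p => a.set p ((k : Int) - (p : Int))) a).getD j 0 =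
      if j ∈ popped then (k : Int) - (j : Int) else a.getD j 0 := by
  intro popped
  induction popped with
  | nil => intro a _ _ j; simp
  | cons p ps ih =>
    intro a hnd hlt j
    have hnd' := (List.nodup_cons.mp hnd)
    have := ih (a.set p ((k : Int) - (p : Int))) hnd'.2
      (fun x hx => by simpa [List.length_set] using hlt x (by simp [hx])) j
    rw [List.foldl_cons, this]
    by_cases hjps : j ∈ ps
    · rw [if_pos hjps, if_pos (by simp [hjps])]
    · by_cases hjp : j = p
      · subst hjp
        rw [if_neg hjps, if_pos (by simp), pvGetD_set_self a j _ (hlt j (by simp))]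
      · rw [if_neg hjps, if_neg (by simp [hjp, hjps]), pvGetD_set_ne a p j _ (Ne.symm hjp)]

-- one step of the main loop preserves the invariant
lemma pvStep_inv (prices : List Int) (k : Nat) (a : List Int) (s : List Nat)
    (hk : k < prices.length) (hinv : pvInv prices k a s) :
    pvInv prices (k+1) (pvStep prices (a, s) k).1 (pvStep prices (a, s) k).2 := by
  obtain ⟨hlen, hbnd, hpw, hmem, hans⟩ := hinv
  obtain ⟨popped, s', hsplit, heq, hallgt, hhead⟩ := pvPopLoop_spec prices k s a
  have hstep1 : (pvStep prices (a, s) k).1 =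
      popped.foldl (fun a p => a.set p ((k : Int) - (p : Int))) a := by
    simp [pvStep, heq]
  have hstep2 : (pvStep prices (a, s) k).2 = k :: s' := by
    simp [pvStep, heq]
  rw [hstep1, hstep2]
  have hsub' : s' <:+ s := ⟨popped, hsplit.symm⟩
  have hsubp : popped <+: s := ⟨s', hsplit.symm⟩
  have hs'mem : ∀ j ∈ s', j ∈ s := fun j hj => hsub'.sublist.mem hj
  have hpmem : ∀ j ∈ popped, j ∈ s := fun j hj => hsubp.sublist.mem hj
  have hnodup : popped.Nodup := by
    have hsn : s.Nodup := List.Pairwise.imp (fun h => ne_of_gt h.1) hpw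
    exact hsn.sublist hsubp.sublist
  have hple : ∀ j ∈ popped, j < a.length := by
    intro j hj
    have := hbnd j (hpmem j hj)
    omega
  -- all remaining stack entries have price ≤ prices[k]
  have hle : ∀ j ∈ s', prices.getD j 0 ≤ prices.getD k 0 := by
    intro j hj
    cases s' with
    | nil => simp at hj
    | cons h t =>
      have hh : prices.getD h 0 ≤ prices.getD k 0 := by
        have := hhead h (by simp)
        omega
      rcases List.mem_cons.mp hj with hj | hj
      · rw [hj]; exact hh
      · have hpw' : List.Pairwise (fun x y => y < x ∧ prices.getD y 0 ≤ prices.getD x 0)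
            (h :: t) := hpw.sublist hsub'.sublist
        have := (List.pairwise_cons.mp hpw').1 j hj
        exact le_trans this.2 hh
  refine ⟨by rw [pvSetAll_length]; exact hlen, ?_, ?_, ?_, ?_⟩
  · intro j hj
    rcases List.mem_cons.mp hj with hj | hj
    · omega
    · exact lt_trans (hbnd j (hs'mem j hj)) (by omega)
  · refine List.pairwise_cons.mpr ⟨?_, hpw.sublist hsub'.sublist⟩
    intro j hj
    exact ⟨hbnd j (hs'mem j hj), hle j hj⟩
  · intro j hj
    by_cases hjk : j = k
    · subst hjk
      constructor
      · intro _ m hm1 hm2; omega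
      · intro _; simp
    · have hjlt : j < k := by omega
      constructor
      · intro hjs m hm1 hm2
        have hjs' : j ∈ s' := by
          rcases List.mem_cons.mp hjs with hcase | hcase
          · exact absurd hcase hjk
          · exact hcase
        have hjold : j ∈ s := hs'mem j hjs'
        by_cases hmk : m = k
        · subst hmk
          have := hle j hjs'
          omega
        · exact ((hmem j hjlt).mp hjold) m hm1 (by omega)
      · intro hnd
        have hjold : j ∈ s := (hmem j hjlt).mpr
          (fun m hm1 hm2 => hnd m hm1 (by omega))
        have hjnk : ¬ prices.getD k 0 < prices.getD j 0 := hnd k hjlt (by omega)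
        rw [hsplit] at hjold
        rcases List.mem_append.mp hjold with hcase | hcase
        · exact absurd (hallgt j hcase) (by omega)
        · exact List.mem_cons_of_mem _ hcase
  · intro j hj1 hj2
    have hjk : j ≠ k := fun h => hj2 (by simp [h])
    have hjs' : j ∉ s' := fun h => hj2 (by simp [h])
    have hjlt : j < k := by omega
    have hjn : j < prices.length := by omega
    rw [pvSetAll_getD k popped a hnodup hple j]
    by_cases hjp : j ∈ popped
    · -- popped now: first drop is exactly at k
      simp only [hjp, if_true]
      have hjolds : j ∈ s := hpmem j hjp
      have hnodrop := (hmem j hjlt).mp hjolds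
      have ht : k - j - 1 < (prices.drop (j+1)).length := by
        simp [List.length_drop]; omega
      have hfirst := pvCountUntil_first (prices.getD j 0) (prices.drop (j+1)) (k - j - 1)
        ht
        (fun m hm => by
          rw [pvDrop_getD]
          exact hnodrop (j+1+m) (by omega) (by omega))
        (by
          rw [pvDrop_getD]
          have : j + 1 + (k - j - 1) = k := by omega
          rw [this]
          have := hallgt j hjp
          omega)
      rw [hfirst]
      have : ((k - j - 1 : Nat) : Int) = (k : Int) - (j : Int) - 1 := by
        push_cast [Nat.cast_sub (by omega : j + 1 ≤ k)]
        omega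
      omega
    · simp only [hjp, if_false]
      have hjolds : j ∉ s := by
        rw [hsplit]; intro h
        rcases List.mem_append.mp h with hcase | hcase
        · exact hjp hcase
        · exact hjs' hcase
      exact hans j hjlt hjolds

-- the whole main loop establishes the invariant at n
lemma pvFold_inv (prices : List Int) : ∀ (k : Nat), k ≤ prices.length →
    pvInv prices k
      (((List.range k).foldl (pvStep prices) (List.replicate prices.length (0 : Int), ([] : List Nat))).1)
      (((List.range k).foldl (pvStep prices) (List.replicate prices.length (0 : Int), ([] : List Nat))).2) := by
  intro k
  induction k with
  | zero =>
    intro _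
    refine ⟨by simp, by simp, by simp, ?_, by simp⟩
    intro j hj; omega
  | succ k ih =>
    intro hk
    have hinv := ih (by omega)
    have := pvStep_inv prices k _ _ (by omega) hinv
    simpa [List.range_succ, List.foldl_append] using this

lemma pvFinalLoop_length (n : Nat) : ∀ (s : List Nat) (a : List Int),
    (pvFinalLoop n a s).length = a.length := by
  intro s
  induction s with
  | nil => intro a; rfl
  | cons p ps ih => intro a; simp [pvFinalLoop, ih, List.length_set]

lemma pvFinalLoop_getD (n : Nat) : ∀ (s : List Nat) (a : List Int), s.Nodup →
    (∀ x ∈ s, x < a.length) → ∀ j,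
    (pvFinalLoop n a s).getD j 0 =
      if j ∈ s then (n : Int) - 1 - (j : Int) else a.getD j 0 := by
  intro s
  induction s with
  | nil => intro a _ _ j; simp [pvFinalLoop]
  | cons p ps ih =>
    intro a hnd hlt j
    have hnd' := List.nodup_cons.mp hnd
    have := ih (a.set p ((n : Int) - 1 - (p : Int))) hnd'.2
      (fun x hx => by simpa [List.length_set] using hlt x (by simp [hx])) j
    rw [pvFinalLoop, this]
    by_cases hjps : j ∈ ps
    · rw [if_pos hjps, if_pos (by simp [hjps])]
    · by_cases hjp : j = p
      · subst hjp
        rw [if_neg hjps, if_pos (by simp), pvGetD_set_self a j _ (hlt j (by simp))]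
      · rw [if_neg hjps, if_neg (by simp [hjp, hjps]), pvGetD_set_ne a p j _ (Ne.symm hjp)]

-- B's port computes the forward-scan value at every index
lemma pvGo_length : ∀ (l : List Int), (pvGo l).length = l.length := by
  intro l
  induction l with
  | nil => rfl
  | cons p rest ih => simp [pvGo, ih]

lemma pvGo_getD : ∀ (l : List Int) (j : Nat), j < l.length →
    (pvGo l).getD j 0 = pvCountUntil (l.getD j 0) (l.drop (j+1)) := by
  intro l
  induction l with
  | nil => intro j hj; simp at hj
  | cons p rest ih =>
    intro j hj
    cases j with
    | zero => simp [pvGo]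
    | succ j' =>
      have := ih j' (by simpa using hj)
      simpa [pvGo] using this

-- ===== VERDICT (by name: the statement is the Claim_ definition above) =====
theorem solution_spec : Claim_equal_solution := by
  intro prices _
  unfold Spec_solution solution solution_alt
  set n := prices.length with hn
  obtain ⟨hlen, hbnd, hpw, hmem, hans⟩ := pvFold_inv prices n (le_refl _)
  set st := (List.range n).foldl (pvStep prices) (List.replicate n (0 : Int), ([] : List Nat)) with hst
  have hnodup : st.2.Nodup := List.Pairwise.imp (fun h => ne_of_gt h.1) hpw
  have hfl := pvFinalLoop_getD n st.2 st.1 hnodup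
    (fun x hx => by rw [hlen]; exact hbnd x hx)
  apply List.ext_getElem
  · rw [pvFinalLoop_length, hlen, pvGo_length]
  · intro j hj1 hj2
    have hjn : j < n := by rwa [pvGo_length] at hj2
    have h1 : (pvFinalLoop n st.1 st.2)[j] = (pvFinalLoop n st.1 st.2).getD j 0 :=
      (List.getD_eq_getElem _ _ hj1).symm
    have h2 : (pvGo prices)[j] = (pvGo prices).getD j 0 :=
      (List.getD_eq_getElem _ _ hj2).symm
    rw [h1, h2, hfl j, pvGo_getD prices j hjn]
    by_cases hjs : j ∈ st.2
    · simp only [hjs, if_true]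
      have hnodrop := (hmem j hjn).mp hjs
      have : pvCountUntil (prices.getD j 0) (prices.drop (j+1)) =
          ((prices.drop (j+1)).length : Int) := by
        apply pvCountUntil_full
        intro m hm
        rw [pvDrop_getD]
        have hmlen : m < n - (j+1) := by simpa [List.length_drop] using hm
        exact hnodrop (j+1+m) (by omega) (by omega)
      rw [this]
      simp [List.length_drop]
      omega
    · simp only [hjs, if_false]
      exact hans j hjn hjs
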